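-- pv_equiv track=rewrite | github.com/theandrew168/advent-of-code | 2024/day15/main.py | parse
-- ===== SOURCE A (Python) =====
-- def parse(lines):
--     grid = []
--     insts = []
--
--     mode = 'grid'
--     for line in lines:
--         if not line:
--             mode = 'insts'
--             continue
--         if mode == 'grid':
--             grid.append(list(line))
--         if mode == 'insts':
--             insts.extend(list(line))
--
--     return grid, insts
-- ===== SOURCE B (Python) =====
-- def parse(lines):
--     lines = list(lines)
--     sep = next((i for i, l in enumerate(lines) if not l), None)
--     if sep is None:
--         return [list(l) for l in lines], []
--     grid = [list(l) for l in lines[:sep]]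
--     insts = [c for l in lines[sep + 1:] if l for c in l]
--     return grid, insts
-- ===== Notes on version B (the rewrite author's own statement) =====
-- stated objective: alternative
-- what changed: Replaces the single mode-flag streaming loop by locating the first blank line and building the grid and instruction list with two separately shaped passes (slice+map and filtered flatten).
import Mathlib
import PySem

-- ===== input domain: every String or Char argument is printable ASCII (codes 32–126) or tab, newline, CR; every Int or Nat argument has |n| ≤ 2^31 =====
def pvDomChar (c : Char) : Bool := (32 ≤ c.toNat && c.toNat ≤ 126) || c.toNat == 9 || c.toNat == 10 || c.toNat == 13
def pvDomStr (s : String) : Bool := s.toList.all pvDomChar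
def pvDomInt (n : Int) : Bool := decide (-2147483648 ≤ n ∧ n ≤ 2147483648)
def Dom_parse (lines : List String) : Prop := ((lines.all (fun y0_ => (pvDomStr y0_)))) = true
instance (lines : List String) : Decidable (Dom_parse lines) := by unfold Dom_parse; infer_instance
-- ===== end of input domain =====

-- B replaces A's mode-flag streaming loop by locating the first blank line and building grid and insts in two separate passes (alternative decomposition, same cost).
-- ===== PORT A =====
def parseChars (l : String) : List String := l.toList.map (fun c => String.mk [c])

def parseStep (st : List (List String) × List String × String) (line : String) :
    List (List String) × List String × String :=
  if line = "" then (st.1, st.2.1, "insts")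
  else
    let grid := if st.2.2 = "grid" then st.1 ++ [parseChars line] else st.1
    let insts := if st.2.2 = "insts" then st.2.1 ++ parseChars line else st.2.1
    (grid, insts, st.2.2)

def parse (lines : List String) : List (List String) × List String :=
  let r := lines.foldl parseStep ([], [], "grid")
  (r.1, r.2.1)

-- ===== PORT B =====
def parse_alt (lines : List String) : List (List String) × List String :=
  match lines.findIdx? (fun l => l = "") with
  | none => (lines.map parseChars, [])
  | some sep =>
      ((lines.take sep).map parseChars,
       ((lines.drop (sep + 1)).filter (fun l => l ≠ "")).flatMap parseChars)

-- ===== PRECONDITION & SPEC =====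
def Spec_parse (lines : List String) (out : List (List String) × List String) : Prop := out = parse_alt lines
instance (lines : List String) (out : List (List String) × List String) : Decidable (Spec_parse lines out) := by unfold Spec_parse; infer_instance

-- ===== CLAIM (what is proved, stated in full; the proofs are below) =====
def Claim_equal_parse : Prop := ∀ (lines : List String), Dom_parse lines → Spec_parse lines (parse lines)

-- ===== LEMMAS AND PROOFS =====

-- ===== VERDICT (by name: the statement is the Claim_ definition above) =====

theorem instsLoop (lines : List String) (g : List (List String)) (i : List String) :
    lines.foldl parseStep (g, i, "insts")
      = (g, i ++ (lines.filter (fun l => l ≠ "")).flatMap parseChars, "insts") := by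
  induction lines generalizing i with
  | nil => simp
  | cons l ls ih =>
    by_cases h : l = ""
    · simp [h, parseStep, ih]
    · simp [List.foldl_cons, parseStep, h, ih, List.append_assoc]

theorem gridLoop (lines : List String) (g : List (List String)) (i : List String) :
    lines.foldl parseStep (g, i, "grid")
      = match lines.findIdx? (fun l => l = "") with
        | none => (g ++ lines.map parseChars, i, "grid")
        | some sep =>
            (g ++ (lines.take sep).map parseChars,
             i ++ ((lines.drop (sep + 1)).filter (fun l => l ≠ "")).flatMap parseChars,
             "insts") := by
  induction lines generalizing g with
  | nil => simp
  | cons l ls ih =>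
    by_cases h : l = ""
    · simp [h, parseStep, List.findIdx?_cons, instsLoop]
    · rw [List.foldl_cons,
        show parseStep (g, i, "grid") l = (g ++ [parseChars l], i, "grid") from by
          simp [parseStep, h], ih]
      cases hf : ls.findIdx? (fun l => l = "") with
      | none => simp [List.findIdx?_cons, h, hf]
      | some sep =>
          simp [List.findIdx?_cons, h, hf, List.drop_succ_cons,
            List.append_assoc]

theorem parse_spec : Claim_equal_parse := by
  intro lines _
  unfold Spec_parse parse parse_alt
  rw [gridLoop]
  cases lines.findIdx? (fun l => l = "") <;> simp
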